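-- pv_equiv track=rewrite | github.com/weiwenjiang/hotNAS-CODES20 | Interface/utility.py | re_quantize
-- ===== SOURCE A (Python) =====
-- import math
--
-- def re_quantize(x, total_num = 16, signed=True):
--     if signed:
--         int_num = 1
--     else:
--         int_num = 0
--
--     y = math.ceil(x)
--
--     while y!=1:
--         y = math.ceil(y/2)
--         int_num+=1
--         if int_num > total_num:
--             return total_num,0
--
--     return int_num,total_num-int_num
-- ===== SOURCE B (Python) =====
-- import math
--
-- def re_quantize(x, total_num=16, signed=True):
--     base = 1 if signed else 0
--     y = math.ceil(x)
--     if y == 1: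
--         return base, total_num - base
--     if y <= 0:
--         # the halving loop never reaches 1; A keeps looping until the cap trips
--         return total_num, 0
--     int_num = base + (y - 1).bit_length()
--     if int_num > total_num:
--         return total_num, 0
--     return int_num, total_num - int_num
-- ===== Notes on version B (the rewrite author's own statement) =====
-- stated objective: simpler
-- what changed: Replaces the repeated ceil-halving loop with a closed form: the number of halving steps from y down to 1 is (y-1).bit_length(), and the y<=0 / over-cap cases are decided directly without iterating.
import Mathlib
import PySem

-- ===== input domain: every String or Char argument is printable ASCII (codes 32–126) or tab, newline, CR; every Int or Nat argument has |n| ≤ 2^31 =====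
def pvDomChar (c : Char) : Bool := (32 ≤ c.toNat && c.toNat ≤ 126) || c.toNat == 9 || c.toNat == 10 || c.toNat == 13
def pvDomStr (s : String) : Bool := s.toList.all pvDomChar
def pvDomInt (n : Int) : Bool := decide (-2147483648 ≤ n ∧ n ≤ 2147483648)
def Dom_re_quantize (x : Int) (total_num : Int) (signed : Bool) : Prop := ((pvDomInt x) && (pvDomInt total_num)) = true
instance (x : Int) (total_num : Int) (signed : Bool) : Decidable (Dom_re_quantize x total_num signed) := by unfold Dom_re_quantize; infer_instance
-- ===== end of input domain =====

-- B replaces A's ceil-halving loop with a closed form via bit_length; return value proved equal for all inputs.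


-- ===== PORT A =====
-- the while loop; terminates because int_num strictly increases and the loop
-- returns as soon as int_num > total_num
def reQuantLoop (total_num : Int) (y : Int) (int_num : Int) : Int × Int :=
  if y ≠ 1 then
    -- math.ceil(y/2) on an int y: exact on Dom (y/2 is an exact double there); ⌈y/2⌉ = ⌊(y+1)/2⌋
    let y' := PySem.Int.floordiv (y + 1) 2
    let int_num' := int_num + 1
    if int_num' > total_num then (total_num, 0)
    else reQuantLoop total_num y' int_num'
  else (int_num, total_num - int_num)
termination_by (total_num + 1 - int_num).toNat
decreasing_by omega

def re_quantize (x : Int) (total_num : Int) (signed : Bool) : Int × Int :=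
  let int_num : Int := if signed then 1 else 0
  let y := x      -- math.ceil(x) on an int is x itself
  reQuantLoop total_num y int_num

-- ===== PORT B =====
def re_quantize_alt (x : Int) (total_num : Int) (signed : Bool) : Int × Int :=
  let base : Int := if signed then 1 else 0
  let y := x      -- math.ceil(x) on an int is x itself
  if y = 1 then (base, total_num - base)
  else if y ≤ 0 then (total_num, 0)
  else
    let int_num := base + (PySem.Int.bitLength (y - 1) : Int)   -- (y-1).bit_length()
    if int_num > total_num then (total_num, 0)
    else (int_num, total_num - int_num)

-- ===== PRECONDITION & SPEC =====
def Spec_re_quantize (x : Int) (total_num : Int) (signed : Bool) (out : Int × Int) : Prop := out = re_quantize_alt x total_num signed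
instance (x : Int) (total_num : Int) (signed : Bool) (out : Int × Int) : Decidable (Spec_re_quantize x total_num signed out) := by unfold Spec_re_quantize; infer_instance

-- ===== CLAIM (what is proved, stated in full; the proofs are below) =====
def Claim_equal_re_quantize : Prop := ∀ (x : Int) (total_num : Int) (signed : Bool), Dom_re_quantize x total_num signed → Spec_re_quantize x total_num signed (re_quantize x total_num signed)

-- ===== LEMMAS AND PROOFS =====

-- for y ≤ 0 the loop variable never reaches 1, so the cap always trips
theorem loop_nonpos (t : Int) : ∀ (n : Nat) (y i : Int), (t + 1 - i).toNat = n → y ≤ 0 →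
    reQuantLoop t y i = (t, 0) := by
  intro n
  induction n using Nat.strong_induction_on with
  | _ n ih =>
    intro y i hn hy
    rw [reQuantLoop]
    have hy1 : y ≠ 1 := by omega
    simp only [hy1, ne_eq, not_false_eq_true, if_pos]
    by_cases hc : i + 1 > t
    · simp [hc]
    · simp only [hc, if_false]
      apply ih ((t + 1 - (i + 1)).toNat) (by omega) _ _ rfl
      have h2 : PySem.Int.floordiv (y + 1) 2 < 1 :=
        (PySem.Int.floordiv_lt_iff_lt_mul (by norm_num)).mpr (by omega)
      omega

theorem loop_pos (t : Int) : ∀ (n : Nat) (y i : Int), y.toNat = n → 2 ≤ y →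
    reQuantLoop t y i =
      (if i + (PySem.Int.bitLength (y - 1) : Int) > t then (t, 0)
       else (i + (PySem.Int.bitLength (y - 1) : Int),
             t - (i + (PySem.Int.bitLength (y - 1) : Int)))) := by
  intro n
  induction n using Nat.strong_induction_on with
  | _ n ih =>
    intro y i hn hy
    have hblpos : 1 ≤ PySem.Int.bitLength (y - 1) := by
      rw [PySem.Int.bitLength_of_pos (by omega)]; omega
    rw [reQuantLoop]
    have hy1 : y ≠ 1 := by omega
    simp only [hy1, ne_eq, not_false_eq_true, if_pos]
    by_cases hc : i + 1 > t
    · have : i + (PySem.Int.bitLength (y - 1) : Int) > t := by omega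
      simp [hc, this]
    · simp only [hc, if_false]
      -- y' = ⌈y/2⌉
      set y' := PySem.Int.floordiv (y + 1) 2 with hy'
      have hy'lo : 1 ≤ y' := (PySem.Int.le_floordiv_iff_mul_le (by norm_num)).mpr (by omega)
      have hy'lt : y' < y := (PySem.Int.floordiv_lt_iff_lt_mul (by norm_num)).mpr (by omega)
      have hhalf : PySem.Int.floordiv (y - 1) 2 = y' - 1 := by
        rcases (PySem.Int.floordiv_eq_iff_of_pos (by norm_num)).mp hy'.symm with ⟨hl, hr⟩
        exact (PySem.Int.floordiv_eq_iff_of_pos (by norm_num)).mpr (by omega)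
      have hbl : PySem.Int.bitLength (y - 1) = PySem.Int.bitLength (y' - 1) + 1 := by
        rw [PySem.Int.bitLength_of_pos (show (0:Int) < y - 1 by omega), hhalf]
      by_cases hy2 : y' = 1
      · -- y = 2: one more step reaches 1
        have hbl1 : PySem.Int.bitLength (y - 1) = 1 := by
          rw [hbl, hy2]; simp [PySem.Int.bitLength_zero]
        rw [hy2, reQuantLoop]
        simp only [ne_eq, not_true_eq_false, if_neg, not_false_eq_true, hbl1]
        split
        · exfalso; rename_i hgt; push_cast at hgt; omega
        · simp only [Prod.mk.injEq]; constructor <;> push_cast <;> omega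
      · have := ih y'.toNat (by omega) y' (i + 1) rfl (by omega)
        rw [this, hbl]
        push_cast
        split <;> split <;> simp only [Prod.mk.injEq] <;>
          first | (exfalso; omega) | (constructor <;> omega)

theorem re_quantize_spec : Claim_equal_re_quantize := by
  intro x t s _
  unfold Spec_re_quantize re_quantize re_quantize_alt
  simp only []
  set base : Int := if s then 1 else 0 with hbase
  by_cases h1 : x = 1
  · subst h1
    rw [reQuantLoop]
    simp
  · by_cases h0 : x ≤ 0
    · rw [loop_nonpos t (t + 1 - base).toNat x base rfl h0]
      have : ¬ x = 1 := h1
      simp [this, h0]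
    · have hx2 : 2 ≤ x := by omega
      rw [loop_pos t x.toNat x base rfl hx2]
      have hnot : ¬ x ≤ 0 := h0
      simp only [h1, hnot, if_false]
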